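-- pv_equiv track=rewrite | github.com/jciant766/Final-RAG-W-extended-token-main | auto_extract_malta_law.py | group_related_articles
-- ===== SOURCE A (Python) =====
-- from typing import List, Dict, Tuple
--
-- def group_related_articles(articles: List[Dict], max_group_size: int = 4) -> List[List[Dict]]:
--     """
--     Group sequential articles that should be chunked together.
--
--     Rules:
--     - Sequential numbers (320, 321, 322)
--     - Max 4 articles per group (unless very short)
--     - Respect semantic breaks
--     """
--
--     if not articles:
--         return []
--
--     groups = []
--     current_group = [articles[0]]
--
--     for i in range(1, len(articles)):
--         prev_article = articles[i-1]
--         curr_article = articles[i]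
--
--         prev_num = int(prev_article['article_num'])
--         curr_num = int(curr_article['article_num'])
--
--         # Check if sequential
--         is_sequential = (curr_num == prev_num + 1)
--
--         # Check if group is getting too large
--         group_too_large = len(current_group) >= max_group_size
--
--         if is_sequential and not group_too_large:
--             # Add to current group
--             current_group.append(curr_article)
--         else:
--             # Start new group
--             groups.append(current_group)
--             current_group = [curr_article]
--
--     # Add last group
--     if current_group:
--         groups.append(current_group)
--
--     return groups
-- ===== SOURCE B (Python) =====
-- def group_related_articles(articles, max_group_size=4):
--     if not articles:
--         return []
--     # pass 1: split the list into maximal runs of consecutively numbered articles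
--     runs = []
--     cur = [articles[0]]
--     for a in articles[1:]:
--         if int(a['article_num']) == int(cur[-1]['article_num']) + 1:
--             cur.append(a)
--         else:
--             runs.append(cur)
--             cur = [a]
--     runs.append(cur)
--     # pass 2: slice each run into size-capped chunks (cap >= 1)
--     k = max(1, max_group_size)
--     return [chunk for run in runs for chunk in chunks(run, k)]
--
-- def chunks(run, k):
--     out = []
--     while run:
--         out.append(run[:k])
--         run = run[k:]
--     return out
-- ===== Notes on version B (the rewrite author's own statement) =====
-- stated objective: alternative
-- what changed: Replaces A's single pass that interleaves the size cap with the sequentiality check by a two-pass decomposition: first split the list into maximal runs of consecutively numbered articles, then slice each run into size-capped chunks (cap max(1, max_group_size)).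
import Mathlib
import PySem

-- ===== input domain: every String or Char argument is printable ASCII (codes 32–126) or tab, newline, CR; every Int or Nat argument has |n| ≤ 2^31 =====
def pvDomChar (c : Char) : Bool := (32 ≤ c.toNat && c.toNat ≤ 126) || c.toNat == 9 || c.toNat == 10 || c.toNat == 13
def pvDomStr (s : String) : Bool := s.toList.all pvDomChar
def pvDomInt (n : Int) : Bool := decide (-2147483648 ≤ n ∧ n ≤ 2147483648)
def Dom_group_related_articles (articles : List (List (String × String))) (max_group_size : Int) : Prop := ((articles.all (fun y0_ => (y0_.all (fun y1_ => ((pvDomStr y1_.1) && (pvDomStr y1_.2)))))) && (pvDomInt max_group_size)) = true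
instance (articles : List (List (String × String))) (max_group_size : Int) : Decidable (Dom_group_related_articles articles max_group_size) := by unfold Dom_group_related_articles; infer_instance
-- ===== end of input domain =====

-- B replaces A's single size-capped pass by a two-pass decomposition (maximal consecutive runs, then
-- size-capped chunking); objective: alternative (same O(n) cost).


-- ===== PORT A =====
-- int(article['article_num']); outside Pre_ the parse fails (Python raises) and we return a junk 0.
def pvParseA (a : List (String × String)) : Int :=
  (((PySem.Dict.mk a).get? "article_num").bind PySem.Int.ofStr?).getD 0

-- A's loop 'for i in range(1, len(articles))' reading articles[i-1] and articles[i], transliterated as a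
-- recursion over the tail that carries prev_article = articles[i-1] together with the loop state
-- (groups, current_group); the final 'if current_group: groups.append(current_group)' is the base case.
def pvALoop (max_group_size : Int) :
    List (String × String) → List (List (String × String)) →
    List (List (List (String × String))) → List (List (String × String)) →
    List (List (List (String × String)))
  | _, [], groups, current_group =>
      if current_group.isEmpty then groups else groups ++ [current_group]
  | prev_article, curr_article :: rest, groups, current_group =>
      let prev_num := pvParseA prev_article
      let curr_num := pvParseA curr_article
      let is_sequential := curr_num == prev_num + 1
      let group_too_large := decide ((current_group.length : Int) ≥ max_group_size)
      if is_sequential && !group_too_large then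
        pvALoop max_group_size curr_article rest groups (current_group ++ [curr_article])
      else
        pvALoop max_group_size curr_article rest (groups ++ [current_group]) [curr_article]

def group_related_articles (articles : List (List (String × String))) (max_group_size : Int) : List (List (List (String × String))) :=
  match articles with
  | [] => []
  | a0 :: rest => pvALoop max_group_size a0 rest [] [a0]

-- ===== PORT B =====
def pvParseB (a : List (String × String)) : Int :=
  (((PySem.Dict.mk a).get? "article_num").bind PySem.Int.ofStr?).getD 0

-- chunks(run, k): 'while run: out.append(run[:k]); run = run[k:]' — callers pass k = max(1, mgs) ≥ 1,
-- so run[:k] = take k and run[k:] = (x::xs).drop k = xs.drop (k-1), exact for k ≥ 1.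
def pvChunks (k : Nat) : List (List (String × String)) → List (List (List (String × String)))
  | [] => []
  | x :: xs => ((x :: xs).take k) :: pvChunks k (xs.drop (k - 1))
  termination_by xs => xs.length
  decreasing_by simp only [List.length_drop, List.length_cons]; omega

def group_related_articles_alt (articles : List (List (String × String))) (max_group_size : Int) : List (List (List (String × String))) :=
  match articles with
  | [] => []
  | a0 :: rest =>
    -- pass 1: 'for a in articles[1:]' with state (runs, cur), comparing against cur[-1]
    let st := rest.foldl (fun st a =>
        match st with
        | (runs, cur) =>
          if pvParseB a == pvParseB ((PySem.List.pyGet? cur (-1)).getD []) + 1 then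
            (runs, cur ++ [a])
          else
            (runs ++ [cur], [a])) (([], [a0]) :
          List (List (List (String × String))) × List (List (String × String)))
    let runs := st.1 ++ [st.2]
    let k : Int := max 1 max_group_size
    -- pass 2: [chunk for run in runs for chunk in chunks(run, k)]
    runs.flatMap (fun run => pvChunks k.toNat run)

-- ===== PRECONDITION & SPEC =====
-- Pre_ excludes exactly the inputs where Python A raises (KeyError / ValueError): with at least two
-- articles, every article must carry an 'article_num' that int() accepts (a single article is never parsed).
def Pre_group_related_articles (articles : List (List (String × String))) (max_group_size : Int) : Prop :=
  articles.length ≤ 1 ∨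
    ∀ a ∈ articles, ((((PySem.Dict.mk a).get? "article_num").bind PySem.Int.ofStr?).isSome : Prop)
instance (articles : List (List (String × String))) (max_group_size : Int) : Decidable (Pre_group_related_articles articles max_group_size) := by unfold Pre_group_related_articles; infer_instance

def pvWitness_group_related_articles : (List (List (String × String))) × Int :=
  ([[("article_num", "1")], [("article_num", "2")], [("article_num", "4")]], 2)

def Spec_group_related_articles (articles : List (List (String × String))) (max_group_size : Int) (out : List (List (List (String × String)))) : Prop := out = group_related_articles_alt articles max_group_size
instance (articles : List (List (String × String))) (max_group_size : Int) (out : List (List (List (String × String)))) : Decidable (Spec_group_related_articles articles max_group_size out) := by unfold Spec_group_related_articles; infer_instance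

-- ===== CLAIM (what is proved, stated in full; the proofs are below) =====
def Claim_equal_group_related_articles : Prop := ∀ (articles : List (List (String × String))) (max_group_size : Int), Dom_group_related_articles articles max_group_size → Pre_group_related_articles articles max_group_size → Spec_group_related_articles articles max_group_size (group_related_articles articles max_group_size)

-- ===== LEMMAS AND PROOFS =====

-- Proof-side reference: split 'rest' into (continuation of the run ending at value p, later runs).
def pvRunsAux (p : Int) : List (List (String × String)) →
    List (List (String × String)) × List (List (List (String × String)))
  | [] => ([], [])
  | b :: rest =>
      let r := pvRunsAux (pvParseA b) rest
      if pvParseA b = p + 1 then (b :: r.1, r.2) else ([], (b :: r.1) :: r.2)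

theorem pvChunks_of_le {k : Nat} {cur : List (List (String × String))}
    (hne : cur ≠ []) (hle : cur.length ≤ k) : pvChunks k cur = [cur] := by
  match cur with
  | [] => exact absurd rfl hne
  | x :: xs =>
    rw [pvChunks]
    simp at hle
    rw [List.take_of_length_le (by simp; omega), List.drop_of_length_le (by omega)]
    rw [pvChunks]

theorem pvChunks_append {k : Nat} {cur ys : List (List (String × String))}
    (hk : cur.length = k) (hne : cur ≠ []) :
    pvChunks k (cur ++ ys) = cur :: pvChunks k ys := by
  match cur with
  | [] => exact absurd rfl hne
  | x :: xs =>
    rw [List.cons_append, pvChunks]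
    simp only [List.length_cons] at hk
    rw [← hk]
    simp [List.take_left]

theorem pv_too_large_iff (c : Nat) (m : Int) (h1 : 1 ≤ c) (h2 : c ≤ (max 1 m).toNat) :
    ((c : Int) ≥ m) ↔ c = (max 1 m).toNat := by
  by_cases hm : m ≤ 1
  · rw [max_eq_left hm] at h2 ⊢
    omega
  · rw [max_eq_right (by omega : (1:Int) ≤ m)] at h2 ⊢
    omega

-- A's loop computes: emit the chunking of (current_group ++ continuation of the current run),
-- then the chunking of each later run.
theorem pvALoop_eq (m : Int) (rest : List (List (String × String))) :
    ∀ (prev : List (String × String)) (groups : List (List (List (String × String))))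
      (cur : List (List (String × String))), cur ≠ [] → cur.length ≤ (max 1 m).toNat →
    pvALoop m prev rest groups cur =
      groups ++ pvChunks (max 1 m).toNat (cur ++ (pvRunsAux (pvParseA prev) rest).1) ++
        ((pvRunsAux (pvParseA prev) rest).2.flatMap (pvChunks (max 1 m).toNat)) := by
  induction rest with
  | nil =>
    intro prev groups cur hne hle
    rw [pvALoop, pvRunsAux]
    simp [hne, pvChunks_of_le hne hle]
  | cons b rest ih =>
    intro prev groups cur hne hle
    rw [pvALoop]
    simp only [pvRunsAux]
    by_cases hseq : pvParseA b = pvParseA prev + 1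
    · rw [if_pos hseq]
      by_cases hbig : (cur.length : Int) ≥ m
      · -- sequential but group full: new group [b]; cur has exactly max size, so it is one full chunk
        have hk : cur.length = (max 1 m).toNat :=
          (pv_too_large_iff cur.length m (by cases cur <;> simp_all) hle).1 hbig
        have hcond : (pvParseA b == pvParseA prev + 1 && !decide ((cur.length : Int) ≥ m)) = false := by
          simp [hbig]
        simp only [hcond, Bool.false_eq_true, if_false]
        rw [ih b (groups ++ [cur]) [b] (by simp) (by simp)]
        rw [pvChunks_append hk hne]
        simp
      · -- sequential, room left: extend current group
        have hcond : (pvParseA b == pvParseA prev + 1 && !decide ((cur.length : Int) ≥ m)) = true := by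
          simp [hbig, hseq]
        simp only [hcond, if_true]
        rw [ih b groups (cur ++ [b]) (by simp) (by simp; omega)]
        simp
    · -- not sequential: close the group; cur (≤ max size) is one chunk
      rw [if_neg hseq]
      have hcond : (pvParseA b == pvParseA prev + 1 && !decide ((cur.length : Int) ≥ m)) = false := by
        simp [hseq]
      simp only [hcond, Bool.false_eq_true, if_false]
      rw [ih b (groups ++ [cur]) [b] (by simp) (by simp)]
      simp only [List.append_nil, List.flatMap_cons, pvChunks_of_le hne hle]
      simp

theorem pv_pyGet_last {cur : List (List (String × String))} {prev : List (String × String)}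
    (h : cur.getLast? = some prev) : PySem.List.pyGet? cur (-1) = some prev := by
  have hne : cur ≠ [] := by rintro rfl; simp at h
  have hl : 1 ≤ cur.length := by cases cur <;> simp_all
  simp [PySem.List.pyGet?, PySem.List.pyIdx?, hl]
  rw [← List.getLast?_eq_getElem?]
  exact h

-- B's pass 1 computes the runs: from state (runs, cur) with cur ending in prev it yields
-- runs ++ (cur ++ continuation) :: later runs.
theorem pvBFold_eq (rest : List (List (String × String))) :
    ∀ (runs : List (List (List (String × String)))) (cur : List (List (String × String)))
      (prev : List (String × String)), cur.getLast? = some prev →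
    (let st := rest.foldl (fun st a =>
        match st with
        | (runs, cur) =>
          if pvParseB a == pvParseB ((PySem.List.pyGet? cur (-1)).getD []) + 1 then
            (runs, cur ++ [a])
          else
            (runs ++ [cur], [a])) ((runs, cur) :
          List (List (List (String × String))) × List (List (String × String)))
     st.1 ++ [st.2]) =
      runs ++ (cur ++ (pvRunsAux (pvParseA prev) rest).1) :: (pvRunsAux (pvParseA prev) rest).2 := by
  induction rest with
  | nil => intro runs cur prev h; simp [pvRunsAux]
  | cons b rest ih =>
    intro runs cur prev h
    simp only [List.foldl_cons, pvRunsAux, pv_pyGet_last h, Option.getD_some]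
    by_cases hseq : pvParseA b = pvParseA prev + 1
    · have hc : (pvParseB b == pvParseB prev + 1) = true := by
        simp [pvParseB, pvParseA] at hseq ⊢; omega
      simp only [hc, if_true, if_pos hseq]
      rw [ih runs (cur ++ [b]) b (by simp)]
      simp
    · have hc : (pvParseB b == pvParseB prev + 1) = false := by
        simp [pvParseB, pvParseA] at hseq ⊢; omega
      simp only [hc, Bool.false_eq_true, if_false, if_neg hseq]
      rw [ih (runs ++ [cur]) [b] b (by simp)]
      simp

-- ===== VERDICT (by name: the statement is the Claim_ definition above) =====
theorem group_related_articles_spec : Claim_equal_group_related_articles := by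
  unfold Claim_equal_group_related_articles
  intro articles mgs _ _
  unfold Spec_group_related_articles
  cases articles with
  | nil => rfl
  | cons a0 rest =>
    rw [group_related_articles, group_related_articles_alt]
    rw [pvALoop_eq mgs rest a0 [] [a0] (by simp) (by simp)]
    have hB := pvBFold_eq rest [] [a0] a0 (by simp)
    simp only at hB ⊢
    rw [hB]
    simp
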